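-- pv_equiv track=rewrite | github.com/Minesweepervariants-Fanmade/rule | __init__.py | _pick_image_name
-- ===== SOURCE A (Python) =====
-- def _pick_image_name(rule_key, image_names):
--     if not rule_key:
--         return ""
--     prefix = rule_key
--     # 按照规范转义特殊字符
--     prefix = prefix.replace("-", "--")
--     prefix = prefix.replace("?", "-q")
--     prefix = prefix.replace("*", "-a")
--     prefix = prefix.replace("<", "-l")
--     prefix = prefix.replace(">", "-g")
--     prefix = prefix.replace("/", "-s")
--     prefix = prefix.replace("\\", "-b")
--     prefix = prefix.replace(":", "-c")
--     for candidate in image_names: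
--         if candidate.startswith(prefix):
--             return candidate
--     return ""
-- ===== SOURCE B (Python) =====
-- _ESCAPE = {"-": "--", "?": "-q", "*": "-a", "<": "-l",
--            ">": "-g", "/": "-s", "\\": "-b", ":": "-c"}
--
--
-- def _pick_image_name(rule_key, image_names):
--     if not rule_key:
--         return ""
--     prefix = "".join(_ESCAPE.get(ch, ch) for ch in rule_key)
--     return next((name for name in image_names if name.startswith(prefix)), "")
-- ===== Notes on version B (the rewrite author's own statement) =====
-- stated objective: simpler
-- what changed: The eight chained full-string replace passes are replaced by one single pass over the key's characters through a fixed escape table, and the explicit search loop becomes next() over a generator with a default.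
import Mathlib
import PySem

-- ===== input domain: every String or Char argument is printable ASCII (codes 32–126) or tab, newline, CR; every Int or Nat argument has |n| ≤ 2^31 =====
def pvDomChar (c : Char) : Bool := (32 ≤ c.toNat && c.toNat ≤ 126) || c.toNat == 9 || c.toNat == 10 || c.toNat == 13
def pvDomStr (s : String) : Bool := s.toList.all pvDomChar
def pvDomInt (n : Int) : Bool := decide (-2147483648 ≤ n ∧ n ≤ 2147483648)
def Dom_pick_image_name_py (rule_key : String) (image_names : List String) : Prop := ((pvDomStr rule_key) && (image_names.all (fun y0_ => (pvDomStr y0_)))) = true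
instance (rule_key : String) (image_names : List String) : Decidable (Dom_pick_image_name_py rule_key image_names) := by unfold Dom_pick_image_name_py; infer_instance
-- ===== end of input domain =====

-- B replaces A's eight chained replace passes by one single pass over the key through a
-- fixed escape table, and the search loop by a first-match lookup with default.

-- ===== PORT A =====
-- A's 'for candidate in image_names: if candidate.startswith(prefix): return candidate / return ""'
def pvLoopA : List String → String → String
  | [], _ => ""
  | candidate :: rest, pfx => if PySem.Str.startswith candidate pfx then candidate else pvLoopA rest pfx

def pick_image_name_py (rule_key : String) (image_names : List String) : String :=
  if rule_key = "" then ""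
  else
    let p1 := PySem.Str.replace rule_key "-" "--"
    let p2 := PySem.Str.replace p1 "?" "-q"
    let p3 := PySem.Str.replace p2 "*" "-a"
    let p4 := PySem.Str.replace p3 "<" "-l"
    let p5 := PySem.Str.replace p4 ">" "-g"
    let p6 := PySem.Str.replace p5 "/" "-s"
    let p7 := PySem.Str.replace p6 "\\" "-b"
    let p8 := PySem.Str.replace p7 ":" "-c"
    pvLoopA image_names p8

-- ===== PORT B =====
def pvEscDict : PySem.Dict Char String :=
  PySem.Dict.mk [('-', "--"), ('?', "-q"), ('*', "-a"), ('<', "-l"),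
                 ('>', "-g"), ('/', "-s"), ('\\', "-b"), (':', "-c")]

def pick_image_name_py_alt (rule_key : String) (image_names : List String) : String :=
  if rule_key = "" then ""
  else
    let pfx := PySem.Str.join "" (rule_key.toList.map (fun ch => pvEscDict.getD ch (String.ofList [ch])))
    ((image_names.find? (fun name => PySem.Str.startswith name pfx)).getD "")

-- ===== PRECONDITION & SPEC =====
def Spec_pick_image_name_py (rule_key : String) (image_names : List String) (out : String) : Prop := out = pick_image_name_py_alt rule_key image_names
instance (rule_key : String) (image_names : List String) (out : String) : Decidable (Spec_pick_image_name_py rule_key image_names out) := by unfold Spec_pick_image_name_py; infer_instance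

-- ===== CLAIM (what is proved, stated in full; the proofs are below) =====
def Claim_equal_pick_image_name_py : Prop := ∀ (rule_key : String) (image_names : List String), Dom_pick_image_name_py rule_key image_names → Spec_pick_image_name_py rule_key image_names (pick_image_name_py rule_key image_names)

-- ===== LEMMAS AND PROOFS =====

-- single-character replace is a flatMap over the characters
theorem pv_go_single (c : Char) (new : List Char) :
    ∀ (l acc : List Char) (fuel : Nat), l.length ≤ fuel →
      PySem.Chars.replace.go [c] new fuel l acc
        = acc.reverse ++ l.flatMap (fun x => if x = c then new else [x]) := by
  intro l
  induction l with
  | nil =>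
      intro acc fuel _
      cases fuel <;> simp [PySem.Chars.replace.go]
  | cons x t ih =>
      intro acc fuel hf
      cases fuel with
      | zero => simp at hf
      | succ fuel =>
        simp only [PySem.Chars.replace.go]
        by_cases hx : x = c
        · subst hx
          rw [if_pos (by simp [List.isPrefixOf])]
          simp only [List.length_cons, List.length_nil, Nat.zero_add, List.drop_succ_cons,
            List.drop_zero]
          rw [ih (new.reverse ++ acc) fuel (by simp at hf; omega)]
          simp
        · rw [if_neg (by simp [List.isPrefixOf]; intro h; exact absurd h.symm (by simpa using hx))]
          rw [ih (x :: acc) fuel (by simpa using Nat.le_of_succ_le_succ hf)]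
          simp [hx]

theorem pv_replace_single (l : List Char) (c : Char) (new : List Char) :
    PySem.Chars.replace l [c] new = l.flatMap (fun x => if x = c then new else [x]) := by
  simp [PySem.Chars.replace, pv_go_single c new l [] l.length (le_refl _)]

-- the list of characters B substitutes for one key character
def pvEscL (x : Char) : List Char := (pvEscDict.getD x (String.ofList [x])).toList

-- the eight single-character substitutions composed on one character equal B's table lookup
theorem pv_comp (x : Char) :
    ((((((([x].flatMap (fun x => if x = '-' then ['-','-'] else [x])).flatMap
      (fun x => if x = '?' then ['-','q'] else [x])).flatMap
      (fun x => if x = '*' then ['-','a'] else [x])).flatMap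
      (fun x => if x = '<' then ['-','l'] else [x])).flatMap
      (fun x => if x = '>' then ['-','g'] else [x])).flatMap
      (fun x => if x = '/' then ['-','s'] else [x])).flatMap
      (fun x => if x = '\\' then ['-','b'] else [x])).flatMap
      (fun x => if x = ':' then ['-','c'] else [x])
    = pvEscL x := by
  by_cases h1 : x = '-'
  · subst h1; decide
  by_cases h2 : x = '?'
  · subst h2; decide
  by_cases h3 : x = '*'
  · subst h3; decide
  by_cases h4 : x = '<'
  · subst h4; decide
  by_cases h5 : x = '>'
  · subst h5; decide
  by_cases h6 : x = '/'
  · subst h6; decide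
  by_cases h7 : x = '\\'
  · subst h7; decide
  by_cases h8 : x = ':'
  · subst h8; decide
  have e1 : ('-' == x) = false := by simp; exact fun h => h1 h.symm
  have e2 : ('?' == x) = false := by simp; exact fun h => h2 h.symm
  have e3 : ('*' == x) = false := by simp; exact fun h => h3 h.symm
  have e4 : ('<' == x) = false := by simp; exact fun h => h4 h.symm
  have e5 : ('>' == x) = false := by simp; exact fun h => h5 h.symm
  have e6 : ('/' == x) = false := by simp; exact fun h => h6 h.symm
  have e7 : ('\\' == x) = false := by simp; exact fun h => h7 h.symm
  have e8 : (':' == x) = false := by simp; exact fun h => h8 h.symm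
  simp only [List.flatMap_cons, List.flatMap_nil, List.append_nil, if_neg h1, if_neg h2,
    if_neg h3, if_neg h4, if_neg h5, if_neg h6, if_neg h7, if_neg h8]
  simp [pvEscL, pvEscDict, PySem.Dict.getD, PySem.Dict.get?, List.find?,
    e1, e2, e3, e4, e5, e6, e7, e8, String.toList_ofList]

-- the eight chained single-character replaces, fused into one pass
theorem pv_chain_eq_flatMap (l : List Char) :
    ((((((((l.flatMap (fun x => if x = '-' then ['-','-'] else [x])).flatMap
      (fun x => if x = '?' then ['-','q'] else [x])).flatMap
      (fun x => if x = '*' then ['-','a'] else [x])).flatMap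
      (fun x => if x = '<' then ['-','l'] else [x])).flatMap
      (fun x => if x = '>' then ['-','g'] else [x])).flatMap
      (fun x => if x = '/' then ['-','s'] else [x])).flatMap
      (fun x => if x = '\\' then ['-','b'] else [x])).flatMap
      (fun x => if x = ':' then ['-','c'] else [x]))
    = l.flatMap pvEscL := by
  induction l with
  | nil => simp
  | cons x t ih =>
      simp only [List.flatMap_cons, List.flatMap_append] at *
      rw [ih, ← pv_comp x]
      simp

-- A's search loop is find? with default
theorem pv_loopA_eq (names : List String) (p : String) :
    pvLoopA names p = ((names.find? (fun name => PySem.Str.startswith name p)).getD "") := by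
  induction names with
  | nil => rfl
  | cons n t ih =>
      simp only [pvLoopA, PySem.Str.startswith, List.find?_cons, ih]
      cases hs : PySem.Chars.startswith n.toList p.toList <;> simp [hs]

-- joining with the empty separator is flatten
theorem pv_join_nil_flatten (ps : List (List Char)) : PySem.Chars.join [] ps = ps.flatten := by
  induction ps with
  | nil => simp [PySem.Chars.join_nil]
  | cons a r ih =>
      cases r with
      | nil => simp [PySem.Chars.join_singleton]
      | cons b r2 => rw [PySem.Chars.join_cons_cons]; simp_all

-- B's join of the mapped pieces is the flatMap of pvEscL
theorem pv_join_eq (l : List Char) :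
    (PySem.Str.join "" (l.map (fun ch => pvEscDict.getD ch (String.ofList [ch])))).toList
      = l.flatMap pvEscL := by
  have hnil : ("" : String).toList = [] := by decide
  simp only [PySem.Str.join, String.toList_ofList, hnil, pv_join_nil_flatten, List.map_map,
    List.flatMap_def]
  exact congrArg List.flatten (List.map_congr_left (fun a _ => rfl))

-- single-character replace, at String level
theorem pv_rep (s : String) (c : Char) (new : String) :
    PySem.Str.replace s (String.ofList [c]) new
      = String.ofList (s.toList.flatMap (fun x => if x = c then new.toList else [x])) := by
  simp [PySem.Str.replace, pv_replace_single]

-- A's chained escaping equals B's one-pass join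
theorem pv_prefix_eq (s : String) :
    PySem.Str.replace (PySem.Str.replace (PySem.Str.replace (PySem.Str.replace
      (PySem.Str.replace (PySem.Str.replace (PySem.Str.replace (PySem.Str.replace
        s "-" "--") "?" "-q") "*" "-a") "<" "-l") ">" "-g") "/" "-s") "\\" "-b") ":" "-c"
    = PySem.Str.join "" (s.toList.map (fun ch => pvEscDict.getD ch (String.ofList [ch]))) := by
  have l1 : ("-" : String) = String.ofList ['-'] := by decide
  have l2 : ("?" : String) = String.ofList ['?'] := by decide
  have l3 : ("*" : String) = String.ofList ['*'] := by decide
  have l4 : ("<" : String) = String.ofList ['<'] := by decide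
  have l5 : (">" : String) = String.ofList ['>'] := by decide
  have l6 : ("/" : String) = String.ofList ['/'] := by decide
  have l7 : ("\\" : String) = String.ofList ['\\'] := by decide
  have l8 : (":" : String) = String.ofList [':'] := by decide
  rw [l1, l2, l3, l4, l5, l6, l7, l8]
  rw [pv_rep, pv_rep, pv_rep, pv_rep, pv_rep, pv_rep, pv_rep, pv_rep]
  simp only [String.toList_ofList]
  have htl : ("--" : String).toList = ['-','-'] := by decide
  have htl2 : ("-q" : String).toList = ['-','q'] := by decide
  have htl3 : ("-a" : String).toList = ['-','a'] := by decide
  have htl4 : ("-l" : String).toList = ['-','l'] := by decide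
  have htl5 : ("-g" : String).toList = ['-','g'] := by decide
  have htl6 : ("-s" : String).toList = ['-','s'] := by decide
  have htl7 : ("-b" : String).toList = ['-','b'] := by decide
  have htl8 : ("-c" : String).toList = ['-','c'] := by decide
  rw [htl, htl2, htl3, htl4, htl5, htl6, htl7, htl8, pv_chain_eq_flatMap]
  rw [← pv_join_eq s.toList]
  exact String.ofList_toList

-- ===== VERDICT (by name: the statement is the Claim_ definition above) =====
theorem pick_image_name_py_spec : Claim_equal_pick_image_name_py := by
  intro rule_key image_names _
  unfold Spec_pick_image_name_py
  by_cases hk : rule_key = ""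
  · simp [pick_image_name_py, pick_image_name_py_alt, hk]
  · simp only [pick_image_name_py, pick_image_name_py_alt, if_neg hk]
    rw [pv_loopA_eq, pv_prefix_eq]
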